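-- pv_equiv track=rewrite | github.com/kani-22/COMPILER-DESIGN- | Experiment 11/quadruple_indirect_triple.py | generate_quadruples
-- ===== SOURCE A (Python) =====
-- def generate_quadruples(postfix):
--     stack = []
--     quadruples = []
--     temp_count = 1
--
--     for token in postfix:
--         if token.isalnum():
--             stack.append(token)
--         else:
--             op2 = stack.pop()
--             op1 = stack.pop()
--             temp = f"t{temp_count}"
--             temp_count += 1
--             quadruples.append((token, op1, op2, temp))
--             stack.append(temp)
--
--     return quadruples
-- ===== SOURCE B (Python) =====
-- def generate_quadruples(postfix):
--     # Phase 1: build an expression forest (stack of trees).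
--     forest = []
--     for token in postfix:
--         if token.isalnum():
--             forest.append(('leaf', token))
--         else:
--             right = forest.pop()
--             left = forest.pop()
--             forest.append(('node', token, left, right))
--
--     # Phase 2: post-order traversal of each remaining root, bottom to top,
--     # numbering temporaries in visit order.
--     quadruples = []
--     count = 1
--
--     def emit(tree):
--         nonlocal count
--         if tree[0] == 'leaf':
--             return tree[1]
--         _, op, left, right = tree
--         l = emit(left)
--         r = emit(right)
--         name = f"t{count}"
--         count += 1
--         quadruples.append((op, l, r, name))
--         return name
--
--     for tree in forest:
--         emit(tree)
--     return quadruples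
-- ===== Notes on version B (the rewrite author's own statement) =====
-- stated objective: alternative
-- what changed: B first builds an explicit expression forest from the postfix tokens and then emits the quadruples by a post-order traversal that numbers temporaries in visit order, instead of A's single pass that emits quadruples directly off a string stack.
import Mathlib
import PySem

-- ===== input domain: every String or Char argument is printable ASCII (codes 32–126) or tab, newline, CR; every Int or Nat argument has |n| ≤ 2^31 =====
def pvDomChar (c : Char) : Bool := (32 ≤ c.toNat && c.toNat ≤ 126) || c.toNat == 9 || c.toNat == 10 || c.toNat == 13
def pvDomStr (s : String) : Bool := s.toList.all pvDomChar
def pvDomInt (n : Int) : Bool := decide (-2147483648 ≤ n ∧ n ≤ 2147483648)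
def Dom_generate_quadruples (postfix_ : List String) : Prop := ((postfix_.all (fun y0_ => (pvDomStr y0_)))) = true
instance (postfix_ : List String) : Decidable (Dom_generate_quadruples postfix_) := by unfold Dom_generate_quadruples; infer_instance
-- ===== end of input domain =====

-- B builds an explicit expression forest and emits quadruples by post-order traversal,
-- instead of A's single pass over a string stack; same cost, different decomposition.


-- f"t{c}" — built from a Char list so the kernel can reduce it (Lean's String.append is opaque)
def pvTempName (c : Int) : String := String.ofList ('t' :: PySem.Int.toChars c)

-- ===== PORT A =====
-- loop state: stack (cons = top of Python's list end), quadruples so far, temp_count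
def pvGoA : List String → List String → List (String × String × String × String) → Int →
    List (String × String × String × String)
  | [], _, quads, _ => quads
  | tok :: rest, stack, quads, c =>
    if PySem.Str.strIsalnum tok then
      pvGoA rest (tok :: stack) quads c
    else
      match stack with
      | op2 :: op1 :: s =>
        let temp := pvTempName c
        pvGoA rest (temp :: s) (quads ++ [(tok, op1, op2, temp)]) (c + 1)
      | _ => quads  -- stack.pop() on an empty stack: IndexError, excluded by Pre_

def generate_quadruples (postfix_ : List String) : List (String × String × String × String) :=
  pvGoA postfix_ [] [] 1

-- ===== PORT B =====
inductive PvTree where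
  | leaf : String → PvTree
  | node : String → PvTree → PvTree → PvTree

-- Phase 1: build the forest (cons = top of Python's list end); none = IndexError (excluded by Pre_)
def pvBuild : List String → List PvTree → Option (List PvTree)
  | [], forest => some forest
  | tok :: rest, forest =>
    if PySem.Str.strIsalnum tok then
      pvBuild rest (.leaf tok :: forest)
    else
      match forest with
      | right :: left :: fs => pvBuild rest (.node tok left right :: fs)
      | _ => none

-- Phase 2: post-order emit; returns (quadruples, result name, next counter)
def pvEmit : PvTree → Int → List (String × String × String × String) × String × Int
  | .leaf s, c => ([], s, c)
  | .node op l r, c =>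
    let el := pvEmit l c
    let er := pvEmit r el.2.2
    let name := pvTempName er.2.2
    (el.1 ++ er.1 ++ [(op, el.2.1, er.2.1, name)], name, er.2.2 + 1)

-- the 'for tree in forest' loop (forest given bottom-to-top, as Python iterates it)
def pvEmitForest : List PvTree → Int → List (String × String × String × String) × List String × Int
  | [], c => ([], [], c)
  | t :: ts, c =>
    let e := pvEmit t c
    let r := pvEmitForest ts e.2.2
    (e.1 ++ r.1, e.2.1 :: r.2.1, r.2.2)

def generate_quadruples_alt (postfix_ : List String) : List (String × String × String × String) :=
  match pvBuild postfix_ [] with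
  | none => []
  | some forest => (pvEmitForest forest.reverse 1).1

-- ===== PRECONDITION & SPEC =====
-- Pre_ excludes exactly the inputs on which A raises IndexError (stack underflow at some
-- operator token): before the operator at position i the stack holds 2*alnum(prefix) - i items.
def Pre_generate_quadruples (postfix_ : List String) : Prop :=
  ∀ i, i < postfix_.length → PySem.Str.strIsalnum (postfix_.getD i "") = false →
    i + 2 ≤ 2 * (postfix_.take i).countP (fun s => PySem.Str.strIsalnum s)
instance (postfix_ : List String) : Decidable (Pre_generate_quadruples postfix_) := by
  unfold Pre_generate_quadruples; infer_instance

def pvWitness_generate_quadruples : List String := ["a", "b", "+", "c", "*"]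

def Spec_generate_quadruples (postfix_ : List String) (out : List (String × String × String × String)) : Prop := out = generate_quadruples_alt postfix_
instance (postfix_ : List String) (out : List (String × String × String × String)) : Decidable (Spec_generate_quadruples postfix_ out) := by unfold Spec_generate_quadruples; infer_instance

-- ===== CLAIM (what is proved, stated in full; the proofs are below) =====
def Claim_equal_generate_quadruples : Prop := ∀ (postfix_ : List String), Dom_generate_quadruples postfix_ → Pre_generate_quadruples postfix_ → Spec_generate_quadruples postfix_ (generate_quadruples postfix_)

-- ===== LEMMAS AND PROOFS =====

lemma pvEmitForest_names_length (xs : List PvTree) (c : Int) :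
    (pvEmitForest xs c).2.1.length = xs.length := by
  induction xs generalizing c with
  | nil => rfl
  | cons t ts ih => simp [pvEmitForest, ih]

lemma pvEmitForest_append (xs : List PvTree) (t : PvTree) (c : Int) :
    pvEmitForest (xs ++ [t]) c =
      ((pvEmitForest xs c).1 ++ (pvEmit t (pvEmitForest xs c).2.2).1,
       (pvEmitForest xs c).2.1 ++ [(pvEmit t (pvEmitForest xs c).2.2).2.1],
       (pvEmit t (pvEmitForest xs c).2.2).2.2) := by
  induction xs generalizing c with
  | nil => simp [pvEmitForest]
  | cons u us ih => simp [pvEmitForest, ih]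

lemma pv_append_two_inj {α : Type} {xs ys : List α} {a b p q : α}
    (h : xs ++ [a, b] = ys ++ [p, q]) : xs = ys ∧ a = p ∧ b = q := by
  have hl : xs.length = ys.length := by
    have := congrArg List.length h
    simp at this; omega
  obtain ⟨h1, h2⟩ := List.append_inj h hl
  obtain ⟨hab, hpq⟩ : a = p ∧ b = q := by simpa using h2
  exact ⟨h1, hab, hpq⟩

lemma pvGoA_emit : ∀ (ts stack : List String) (F : List PvTree)
    (quads : List (String × String × String × String)) (c : Int),
    (∀ i, i < ts.length → PySem.Str.strIsalnum (ts.getD i "") = false →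
      i + 2 ≤ stack.length + 2 * (ts.take i).countP (fun s => PySem.Str.strIsalnum s)) →
    pvEmitForest F.reverse 1 = (quads, stack.reverse, c) →
    ∃ F', pvBuild ts F = some F' ∧ pvGoA ts stack quads c = (pvEmitForest F'.reverse 1).1 := by
  intro ts
  induction ts with
  | nil =>
    intro stack F quads c _ hEF
    exact ⟨F, rfl, by simp [pvGoA, hEF]⟩
  | cons tok rest ih =>
    intro stack F quads c hok hEF
    by_cases ha : PySem.Str.strIsalnum tok = true
    · -- operand: push a leaf
      have hac : PySem.Chars.strIsalnum tok.toList = true := by simpa using ha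
      have hEF' : pvEmitForest (PvTree.leaf tok :: F).reverse 1
          = (quads, (tok :: stack).reverse, c) := by
        simp [List.reverse_cons, pvEmitForest_append, hEF, pvEmit]
      have hok' : ∀ i, i < rest.length → PySem.Str.strIsalnum (rest.getD i "") = false →
          i + 2 ≤ (tok :: stack).length + 2 * (rest.take i).countP (fun s => PySem.Str.strIsalnum s) := by
        intro i hi hf
        have := hok (i + 1) (by simpa using Nat.succ_lt_succ hi) (by simpa using hf)
        simp [List.take_succ_cons, hac] at this ⊢
        omega
      obtain ⟨F', h1, h2⟩ := ih (tok :: stack) (PvTree.leaf tok :: F) quads c hok' hEF'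
      exact ⟨F', by simp [pvBuild, hac, h1], by simp [pvGoA, hac, h2]⟩
    · -- operator: pop two
      have hac : PySem.Chars.strIsalnum tok.toList = false := by
        simpa using ha
      have ha' : PySem.Str.strIsalnum tok = false := by simpa using ha
      have h2le : 2 ≤ stack.length := by
        have := hok 0 (by simp) (by simpa using ha')
        simpa using this
      obtain ⟨op2, op1, s, rfl⟩ : ∃ op2 op1 s, stack = op2 :: op1 :: s := by
        match stack, h2le with
        | op2 :: op1 :: s, _ => exact ⟨op2, op1, s, rfl⟩
      have hFlen : F.length = s.length + 2 := by
        have := congrArg (fun p => p.2.1.length) hEF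
        simpa [pvEmitForest_names_length] using this
      obtain ⟨r, l, Fs, rfl⟩ : ∃ r l Fs, F = r :: l :: Fs := by
        match F, hFlen with
        | r :: l :: Fs, _ => exact ⟨r, l, Fs, rfl⟩
      -- decompose the emit of the old forest
      have hrev : (r :: l :: Fs).reverse = (Fs.reverse ++ [l]) ++ [r] := by simp
      rw [hrev, pvEmitForest_append, pvEmitForest_append] at hEF
      set a := pvEmitForest Fs.reverse 1 with ha_def
      set el := pvEmit l a.2.2 with hel_def
      set er := pvEmit r el.2.2 with her_def
      have hq : a.1 ++ el.1 ++ er.1 = quads := congrArg Prod.fst hEF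
      have hns : a.2.1 ++ [el.2.1, er.2.1] = s.reverse ++ [op1, op2] := by
        have := congrArg (fun p => p.2.1) hEF
        simpa using this
      have hc : er.2.2 = c := congrArg (fun p => p.2.2) hEF
      obtain ⟨hns0, hn1, hn2⟩ := pv_append_two_inj hns
      -- emit of the new forest with the node pushed
      have hEF' : pvEmitForest (PvTree.node tok l r :: Fs).reverse 1
          = (quads ++ [(tok, op1, op2, pvTempName c)],
             (pvTempName c :: s).reverse, c + 1) := by
        simp only [List.reverse_cons, pvEmitForest_append, ← ha_def]
        simp [pvEmit, ← hel_def, ← her_def, hc, hn1, hn2, hns0, ← hq]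
      have hok' : ∀ i, i < rest.length → PySem.Str.strIsalnum (rest.getD i "") = false →
          i + 2 ≤ (pvTempName c :: s).length + 2 * (rest.take i).countP (fun s => PySem.Str.strIsalnum s) := by
        intro i hi hf
        have := hok (i + 1) (by simpa using Nat.succ_lt_succ hi) (by simpa using hf)
        simp [List.take_succ_cons, hac] at this ⊢
        omega
      obtain ⟨F', h1, h2⟩ := ih (pvTempName c :: s) (PvTree.node tok l r :: Fs)
        (quads ++ [(tok, op1, op2, pvTempName c)]) (c + 1) hok' hEF'
      exact ⟨F', by simp [pvBuild, hac, h1], by simp [pvGoA, hac, h2]⟩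

-- ===== VERDICT (by name: the statement is the Claim_ definition above) =====
theorem generate_quadruples_spec : Claim_equal_generate_quadruples := by
  intro postfix_ _ hpre
  obtain ⟨F', h1, h2⟩ := pvGoA_emit postfix_ [] [] [] 1 (by simpa using hpre) rfl
  unfold Spec_generate_quadruples generate_quadruples generate_quadruples_alt
  rw [h1, h2]
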